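-- pv_equiv track=rewrite | github.com/Peazfull/the-forge | services/youtube_brewery/transcript_utils.py | _select_caption_entry
-- ===== SOURCE A (Python) =====
-- from typing import Dict, List, Optional, Tuple
--
-- EXT_PREFERENCES = ["vtt", "json3", "srv3", "ttml"]
--
-- def _select_caption_entry(entries: List[Dict]) -> Optional[Dict]:
--     if not entries:
--         return None
--
--     for ext in EXT_PREFERENCES:
--         for entry in entries:
--             if entry.get("ext") == ext and entry.get("url"):
--                 return entry
--
--     for entry in entries:
--         if entry.get("url"):
--             return entry
--
--     return None
-- ===== SOURCE B (Python) =====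
-- EXT_PREFERENCES = ["vtt", "json3", "srv3", "ttml"]
--
-- def _select_caption_entry(entries):
--     best = None
--     best_rank = None
--     for entry in entries:
--         if not entry.get("url"):
--             continue
--         ext = entry.get("ext")
--         rank = EXT_PREFERENCES.index(ext) if ext in EXT_PREFERENCES else len(EXT_PREFERENCES)
--         if best is None or rank < best_rank:
--             best, best_rank = entry, rank
--     return best
-- ===== Notes on version B (the rewrite author's own statement) =====
-- stated objective: simpler
-- what changed: Replaces A's five scans of the list (one find per preferred extension plus a fallback scan) by a single pass that keeps the url-bearing entry with the smallest preference rank, updating only on strict '<' so the earliest entry wins ties.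
import Mathlib
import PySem

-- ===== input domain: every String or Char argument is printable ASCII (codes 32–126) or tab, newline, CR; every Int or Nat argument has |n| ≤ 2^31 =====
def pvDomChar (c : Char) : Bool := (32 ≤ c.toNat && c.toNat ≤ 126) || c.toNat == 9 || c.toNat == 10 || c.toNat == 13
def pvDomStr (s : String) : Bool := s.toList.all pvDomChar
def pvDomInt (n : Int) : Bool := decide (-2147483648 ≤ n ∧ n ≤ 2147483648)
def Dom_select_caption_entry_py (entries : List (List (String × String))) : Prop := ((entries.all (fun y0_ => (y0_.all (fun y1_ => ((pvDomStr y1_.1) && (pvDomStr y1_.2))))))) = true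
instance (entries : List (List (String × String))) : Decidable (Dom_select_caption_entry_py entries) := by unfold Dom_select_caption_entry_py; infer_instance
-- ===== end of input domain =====

-- B replaces A's five scans (one per preferred extension, plus a fallback scan) by a single
-- pass keeping the entry with the smallest preference rank; objective: simpler.

-- ===== PORT A =====

-- dict.get(k): first-match lookup in the association list
def pvGet (e : List (String × String)) (k : String) : Option String :=
  (e.find? (fun p => p.1 == k)).map (·.2)

def extPrefs : List String := ["vtt", "json3", "srv3", "ttml"]

-- truthiness of entry.get("url"): present and non-empty
def pvUrlTruthy (e : List (String × String)) : Bool :=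
  match pvGet e "url" with
  | some s => !(s == "")
  | none => false

-- 'for ext in EXT_PREFERENCES: for entry in entries: if …: return entry'
def pvAScan : List String → List (List (String × String)) → Option (List (String × String))
  | [], _ => none
  | p :: ps, entries =>
    match entries.find? (fun e => (pvGet e "ext" == some p) && pvUrlTruthy e) with
    | some e => some e
    | none => pvAScan ps entries

def select_caption_entry_py (entries : List (List (String × String))) : Option (List (String × String)) :=
  if entries = [] then none
  else
    match pvAScan extPrefs entries with
    | some e => some e
    | none => entries.find? pvUrlTruthy

-- ===== PORT B =====

-- rank = EXT_PREFERENCES.index(ext) if ext in EXT_PREFERENCES else len(EXT_PREFERENCES)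
def pvRank (e : List (String × String)) : Int :=
  match pvGet e "ext" with
  | some x =>
    match PySem.List.index? extPrefs x with
    | some i => (i : Int)
    | none => (extPrefs.length : Int)
  | none => (extPrefs.length : Int)

-- loop body: skip url-less entries, keep the best (rank, entry) with strict '<'
def pvStep (best : Option (Int × List (String × String))) (e : List (String × String)) :
    Option (Int × List (String × String)) :=
  if pvUrlTruthy e then
    match best with
    | none => some (pvRank e, e)
    | some (r, b) => if pvRank e < r then some (pvRank e, e) else some (r, b)
  else best

def select_caption_entry_py_alt (entries : List (List (String × String))) : Option (List (String × String)) :=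
  (entries.foldl pvStep none).map (·.2)

-- ===== PRECONDITION & SPEC =====
def Spec_select_caption_entry_py (entries : List (List (String × String))) (out : Option (List (String × String))) : Prop := out = select_caption_entry_py_alt entries
instance (entries : List (List (String × String))) (out : Option (List (String × String))) : Decidable (Spec_select_caption_entry_py entries out) := by unfold Spec_select_caption_entry_py; infer_instance

-- ===== CLAIM (what is proved, stated in full; the proofs are below) =====
def Claim_equal_select_caption_entry_py : Prop := ∀ (entries : List (List (String × String))), Dom_select_caption_entry_py entries → Spec_select_caption_entry_py entries (select_caption_entry_py entries)

-- ===== LEMMAS AND PROOFS =====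

-- keep the pair with the smaller rank, the left one on ties
def pvMerge (p q : Int × List (String × String)) : Int × List (String × String) :=
  if q.1 < p.1 then q else p

def pvMergeO (p : Int × List (String × String)) (o : Option (Int × List (String × String))) :
    Int × List (String × String) :=
  match o with
  | none => p
  | some q => pvMerge p q

-- first entry of minimal rank among the url-bearing entries
def pvBest (f : List (String × String) → Int) :
    List (List (String × String)) → Option (Int × List (String × String))
  | [] => none
  | e :: es => if pvUrlTruthy e then some (pvMergeO (f e, e) (pvBest f es)) else pvBest f es

theorem pvMerge_assoc (p q s : Int × List (String × String)) :
    pvMerge (pvMerge p q) s = pvMerge p (pvMerge q s) := by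
  unfold pvMerge
  split_ifs <;> first | rfl | omega

theorem foldl_step_some (es : List (List (String × String))) (p : Int × List (String × String)) :
    es.foldl pvStep (some p) = some (pvMergeO p (pvBest pvRank es)) := by
  induction es generalizing p with
  | nil => rfl
  | cons e es ih =>
    simp only [List.foldl_cons, pvStep, pvBest]
    by_cases hu : pvUrlTruthy e
    · simp only [hu, if_pos]
      have hstep : (if pvRank e < p.1 then some (pvRank e, e) else some p)
          = some (pvMerge p (pvRank e, e)) := by
        unfold pvMerge; split_ifs <;> rfl
      obtain ⟨r, b⟩ := p
      simp only [hstep]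
      rw [ih]
      cases hb : pvBest pvRank es with
      | none => rfl
      | some q => simp only [pvMergeO, pvMerge_assoc]
    · simp only [hu, if_neg, Bool.false_eq_true, not_false_iff, ih]

theorem foldl_step_none (es : List (List (String × String))) :
    es.foldl pvStep none = pvBest pvRank es := by
  cases es with
  | nil => rfl
  | cons e es =>
    simp only [List.foldl_cons, pvStep, pvBest]
    by_cases hu : pvUrlTruthy e
    · simp only [hu, if_pos, foldl_step_some]
    · simp only [hu, if_neg, Bool.false_eq_true, not_false_iff, foldl_step_none es]

-- rank with respect to a remaining preference list
def pvRankP (ps : List String) (e : List (String × String)) : Int :=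
  match pvGet e "ext" with
  | some x =>
    match PySem.List.index? ps x with
    | some i => (i : Int)
    | none => (ps.length : Int)
  | none => (ps.length : Int)

theorem pvRankP_extPrefs : pvRankP extPrefs = pvRank := rfl

theorem pvRankP_nonneg (ps : List String) (e : List (String × String)) : 0 ≤ pvRankP ps e := by
  unfold pvRankP
  split
  · split <;> simp
  · simp

theorem pvBest_rank_eq (f : List (String × String) → Int) (es : List (List (String × String)))
    (r : Int) (b : List (String × String)) (h : pvBest f es = some (r, b)) : r = f b := by
  induction es generalizing r b with
  | nil => simp [pvBest] at h
  | cons e es ih =>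
    simp only [pvBest] at h
    by_cases hu : pvUrlTruthy e
    · rw [if_pos hu] at h
      cases hb : pvBest f es with
      | none =>
        rw [hb] at h
        simp only [pvMergeO, Option.some.injEq, Prod.mk.injEq] at h
        rw [← h.1, ← h.2]
      | some q =>
        obtain ⟨r', b'⟩ := q
        rw [hb] at h
        simp only [pvMergeO, pvMerge] at h
        split_ifs at h
        · simp only [Option.some.injEq, Prod.mk.injEq] at h
          rw [← h.1, ← h.2]; exact ih r' b' hb
        · simp only [Option.some.injEq, Prod.mk.injEq] at h
          rw [← h.1, ← h.2]
    · rw [if_neg hu] at h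
      exact ih r b h

theorem pvBest_congr (f g : List (String × String) → Int) (es : List (List (String × String)))
    (h : ∀ e ∈ es, pvUrlTruthy e → f e = g e) : pvBest f es = pvBest g es := by
  induction es with
  | nil => rfl
  | cons e es ih =>
    simp only [pvBest]
    by_cases hu : pvUrlTruthy e
    · simp only [hu, if_pos, h e (by simp) hu,
        ih (fun x hx hux => h x (List.mem_cons_of_mem _ hx) hux)]
    · rw [if_neg hu, if_neg hu]
      exact ih (fun x hx hux => h x (List.mem_cons_of_mem _ hx) hux)

theorem pvBest_const_zero (es : List (List (String × String))) :
    pvBest (fun _ => (0 : Int)) es = (es.find? pvUrlTruthy).map (fun e => ((0 : Int), e)) := by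
  induction es with
  | nil => rfl
  | cons e es ih =>
    by_cases hu : pvUrlTruthy e
    · rw [List.find?_cons_of_pos hu]
      simp only [pvBest, if_pos hu, ih]
      cases hf : es.find? pvUrlTruthy with
      | none => rfl
      | some b => simp [pvMergeO, pvMerge]
    · rw [List.find?_cons_of_neg hu]
      simp only [pvBest, if_neg hu]
      exact ih

theorem pvBest_find_zero (f : List (String × String) → Int) (es : List (List (String × String)))
    (e₀ : List (String × String)) (hnn : ∀ e, 0 ≤ f e)
    (h : es.find? (fun e => (f e == 0) && pvUrlTruthy e) = some e₀) :
    pvBest f es = some (0, e₀) := by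
  induction es with
  | nil => simp at h
  | cons e es ih =>
    simp only [pvBest]
    by_cases hp : ((f e == 0) && pvUrlTruthy e) = true
    · rw [show List.find? (fun e => f e == 0 && pvUrlTruthy e) (e :: es) = some e from
        List.find?_cons_of_pos hp] at h
      simp only [Option.some.injEq] at h
      subst h
      simp only [Bool.and_eq_true, beq_iff_eq] at hp
      rw [if_pos hp.2]
      cases hb : pvBest f es with
      | none => simp [pvMergeO, hp.1]
      | some q =>
        obtain ⟨r, b⟩ := q
        have hr : r = f b := pvBest_rank_eq f es r b hb
        have hnl : ¬ (r < f e) := by rw [hr, hp.1]; exact not_lt.mpr (hnn b)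
        simp only [pvMergeO, pvMerge, if_neg hnl, Option.some.injEq, Prod.mk.injEq]
        exact ⟨hp.1, trivial⟩
    · rw [show List.find? (fun e => f e == 0 && pvUrlTruthy e) (e :: es)
          = List.find? (fun e => f e == 0 && pvUrlTruthy e) es from
        List.find?_cons_of_neg (by simpa using hp)] at h
      by_cases hu : pvUrlTruthy e
      · have hf : f e ≠ 0 := by
          intro h0; exact hp (by simp [h0, hu])
        have hfe : (0 : Int) < f e := lt_of_le_of_ne (hnn e) (Ne.symm hf)
        rw [if_pos hu, ih h]
        simp [pvMergeO, pvMerge, hfe]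
      · rw [if_neg hu]
        exact ih h

theorem pvBest_shift (f g : List (String × String) → Int) (es : List (List (String × String)))
    (h : ∀ e ∈ es, pvUrlTruthy e → f e = 1 + g e) :
    pvBest f es = (pvBest g es).map (fun q => (1 + q.1, q.2)) := by
  induction es with
  | nil => rfl
  | cons e es ih =>
    have htail : ∀ x ∈ es, pvUrlTruthy x → f x = 1 + g x :=
      fun x hx => h x (List.mem_cons_of_mem _ hx)
    simp only [pvBest]
    by_cases hu : pvUrlTruthy e
    · rw [if_pos hu, if_pos hu, ih htail, h e (by simp) hu]
      cases hb : pvBest g es with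
      | none => rfl
      | some q =>
        obtain ⟨r, b⟩ := q
        simp only [Option.map_some, pvMergeO, pvMerge, Option.some.injEq]
        by_cases hlt : r < g e
        · have h1 : (1 : Int) + r < 1 + g e := by omega
          simp [hlt, h1]
        · have h1 : ¬ ((1 : Int) + r < 1 + g e) := by omega
          simp [hlt, h1]
    · rw [if_neg hu, if_neg hu]
      exact ih htail

-- A's scans followed by the fallback scan
def pvAFull (ps : List String) (es : List (List (String × String))) :
    Option (List (String × String)) :=
  match pvAScan ps es with
  | some e => some e
  | none => es.find? pvUrlTruthy

theorem pvRankP_cons_eq_zero (p : String) (ps : List String) (e : List (String × String))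
    (hx : pvGet e "ext" = some p) : pvRankP (p :: ps) e = 0 := by
  simp only [pvRankP, hx, PySem.List.index?_cons_self]
  rfl

theorem pvRankP_cons_shift (p : String) (ps : List String) (e : List (String × String))
    (hne : (pvGet e "ext" == some p) = false) :
    pvRankP (p :: ps) e = 1 + pvRankP ps e := by
  unfold pvRankP
  cases hx : pvGet e "ext" with
  | none => simp; omega
  | some x =>
    rw [hx] at hne
    simp only [beq_eq_false_iff_ne, ne_eq, Option.some.injEq] at hne
    have hxp : p ≠ x := fun hpx => hne hpx.symm
    simp only [PySem.List.index?_cons_of_ne ps hxp]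
    cases PySem.List.index? ps x with
    | none => simp; omega
    | some i => simp; omega

theorem pvRankP_cons_zero_iff (p : String) (ps : List String) (e : List (String × String)) :
    (pvGet e "ext" == some p) = (pvRankP (p :: ps) e == 0) := by
  by_cases hx : (pvGet e "ext" == some p) = true
  · rw [hx, pvRankP_cons_eq_zero p ps e (by simpa using hx)]
    simp
  · have hne : (pvGet e "ext" == some p) = false := by simpa using hx
    rw [hne, pvRankP_cons_shift p ps e hne]
    have := pvRankP_nonneg ps e
    have hz : ¬ (1 + pvRankP ps e = 0) := by omega
    simp [hz]

theorem pvAFull_eq_best (ps : List String) (es : List (List (String × String))) :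
    pvAFull ps es = (pvBest (pvRankP ps) es).map (·.2) := by
  induction ps with
  | nil =>
    have hz : ∀ e ∈ es, pvUrlTruthy e → pvRankP [] e = (fun _ => (0 : Int)) e := by
      intro e _ _
      unfold pvRankP
      cases pvGet e "ext" <;> simp [PySem.List.index?]
    rw [pvBest_congr _ _ es hz, pvBest_const_zero]
    unfold pvAFull pvAScan
    cases es.find? pvUrlTruthy <;> rfl
  | cons p ps ih =>
    have hpred : (fun e => (pvGet e "ext" == some p) && pvUrlTruthy e)
        = (fun e => (pvRankP (p :: ps) e == 0) && pvUrlTruthy e) := by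
      funext e; rw [pvRankP_cons_zero_iff]
    cases hf : es.find? (fun e => (pvGet e "ext" == some p) && pvUrlTruthy e) with
    | some e₀ =>
      have h0 : es.find? (fun e => (pvRankP (p :: ps) e == 0) && pvUrlTruthy e) = some e₀ := by
        rw [← hpred]; exact hf
      have : pvBest (pvRankP (p :: ps)) es = some (0, e₀) :=
        pvBest_find_zero _ es e₀ (pvRankP_nonneg _) h0
      simp only [pvAFull, pvAScan, hf, this, Option.map_some]
    | none =>
      have hall : ∀ e ∈ es, pvUrlTruthy e → pvRankP (p :: ps) e = 1 + pvRankP ps e := by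
        intro e he hu
        apply pvRankP_cons_shift
        have := List.find?_eq_none.mp hf e he
        simp only [Bool.and_eq_true, not_and] at this
        by_cases hx : (pvGet e "ext" == some p) = true
        · exact absurd hu (this hx)
        · simpa using hx
      rw [pvBest_shift _ (pvRankP ps) es hall]
      have : pvAFull (p :: ps) es = pvAFull ps es := by
        unfold pvAFull
        simp only [pvAScan, hf]
      rw [this, ih]
      cases pvBest (pvRankP ps) es <;> rfl

-- ===== VERDICT (by name: the statement is the Claim_ definition above) =====
theorem select_caption_entry_py_spec : Claim_equal_select_caption_entry_py := by
  intro entries _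
  unfold Spec_select_caption_entry_py select_caption_entry_py select_caption_entry_py_alt
  rw [foldl_step_none, ← pvRankP_extPrefs, ← pvAFull_eq_best]
  unfold pvAFull
  cases entries with
  | nil => rfl
  | cons e es => rw [if_neg (by simp)]
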